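-- pv_equiv track=rewrite | github.com/ZYiJie/sohu-2022-competition | nlp/seqLabeling/train_eval_entityWeighted.py | create_mask
-- ===== SOURCE A (Python) =====
-- def create_mask(text, entityArr):
--     content_mask = [0] * len(text)
--     entity_mask = []
--     for id, entity in enumerate(entityArr):
--         entity_mask += [id+1] * len(entity)
--
--         idx = text.find(entity,0)
--         while idx >=0 :
--             for i in range(idx,idx+len(entity)):
--                 content_mask[i] = id + 1
--             idx = text.find(entity,idx+1)
--     return content_mask, entity_mask
-- ===== SOURCE B (Python) =====
-- def create_mask(text, entityArr):
--     # Position-major rewrite: for each text position, the label is the last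
--     # (highest-id) entity with an occurrence covering that position; an entity
--     # of length L covers position i iff it occurs inside the window
--     # text[max(0, i-L+1) : i+L] (which forces a start s with i-L+1 <= s <= i).
--     n = len(text)
--
--     def label(i):
--         best = 0
--         for id, e in enumerate(entityArr):
--             L = len(e)
--             if L and e in text[max(0, i - L + 1):i + L]:
--                 best = id + 1
--         return best
--
--     content_mask = [label(i) for i in range(n)]
--     entity_mask = [id + 1 for id, e in enumerate(entityArr) for _ in e]
--     return content_mask, entity_mask
-- ===== Notes on version B (the rewrite author's own statement) =====
-- stated objective: alternative
-- what changed: B computes the mask position-by-position (each position gets the last entity id whose occurrence covers it, detected with a single substring test on a length-bounded window), replacing A's per-entity find/while loop with nested index-overwrite passes; the entity mask becomes one flat comprehension.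
import Mathlib
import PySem

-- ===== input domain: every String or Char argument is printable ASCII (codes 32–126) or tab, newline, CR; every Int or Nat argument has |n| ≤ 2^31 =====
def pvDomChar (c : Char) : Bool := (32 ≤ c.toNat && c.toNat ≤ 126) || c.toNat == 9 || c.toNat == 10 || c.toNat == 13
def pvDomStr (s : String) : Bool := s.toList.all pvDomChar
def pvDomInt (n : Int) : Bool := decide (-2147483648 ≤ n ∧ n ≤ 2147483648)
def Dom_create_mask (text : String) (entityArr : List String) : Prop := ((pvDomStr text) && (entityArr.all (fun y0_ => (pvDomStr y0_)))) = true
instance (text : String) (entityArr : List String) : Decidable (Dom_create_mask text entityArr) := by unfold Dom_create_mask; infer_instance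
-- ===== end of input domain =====

-- B relabels the text position-by-position (each position gets the last entity whose occurrence
-- covers it, found by a window substring test) instead of A's per-occurrence find/overwrite
-- loops: an alternative traversal of the same data (not claimed faster).


-- ===== PORT A =====
-- 'for i in range(idx, idx+len(entity)): content_mask[i] = id + 1'
-- (every i here is a real in-range index — find returned an occurrence — so List.set on i.toNat is exact)
def aWrite (id : Int) (cm : List Int) (idx L : Int) : List Int :=
  (PySem.List.pyRange idx (idx + L)).foldl (fun cm i => cm.set i.toNat (id + 1)) cm

-- 'while idx >= 0: …; idx = text.find(entity, idx+1)'; idx strictly increases and is ≤ len(text),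
-- so fuel = len(text) + 2 makes the same computation total.
def aLoop (t e : List Char) (id : Int) (fuel : Nat) (idx : Int) (cm : List Int) : List Int :=
  match fuel with
  | 0 => cm
  | fuel + 1 =>
    if idx ≥ 0 then
      aLoop t e id fuel (PySem.Chars.findFrom t e (idx + 1)) (aWrite id cm idx (e.length : Int))
    else cm

def create_mask (text : String) (entityArr : List String) : List Int × List Int :=
  let t := text.toList
  (PySem.List.enumerate entityArr 0).foldl
    (fun (acc : List Int × List Int) p =>
      (aLoop t p.2.toList p.1 (t.length + 2) (PySem.Str.findFrom text p.2 0) acc.1,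
       acc.2 ++ PySem.List.pyRepeat [p.1 + 1] (PySem.Str.len p.2)))
    (List.replicate t.length 0, [])

-- ===== PORT B =====
-- 'L and e in text[max(0, i-L+1) : i+L]' then 'best = id + 1'
def bLabel (t : List Char) (entityArr : List String) (i : Int) : Int :=
  (PySem.List.enumerate entityArr 0).foldl
    (fun best p =>
      let L : Int := PySem.Str.len p.2
      if L ≠ 0 ∧ PySem.Chars.isIn p.2.toList
          (PySem.List.slice t (some (max 0 (i - L + 1))) (some (i + L))) = true
      then p.1 + 1 else best)
    0

def create_mask_alt (text : String) (entityArr : List String) : List Int × List Int :=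
  let t := text.toList
  ((PySem.List.pyRange 0 (PySem.Str.len text)).map (fun i => bLabel t entityArr i),
   (PySem.List.enumerate entityArr 0).flatMap (fun p => p.2.toList.map (fun _ => p.1 + 1)))

-- ===== PRECONDITION & SPEC =====
def Spec_create_mask (text : String) (entityArr : List String) (out : List Int × List Int) : Prop := out = create_mask_alt text entityArr
instance (text : String) (entityArr : List String) (out : List Int × List Int) : Decidable (Spec_create_mask text entityArr out) := by unfold Spec_create_mask; infer_instance

-- ===== CLAIM (what is proved, stated in full; the proofs are below) =====
def Claim_equal_create_mask : Prop := ∀ (text : String) (entityArr : List String), Dom_create_mask text entityArr → Spec_create_mask text entityArr (create_mask text entityArr)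

-- ===== LEMMAS AND PROOFS =====

theorem foldl_set_length (l : List Int) (v : Int) (cm : List Int) :
    (l.foldl (fun cm i => cm.set i.toNat v) cm).length = cm.length := by
  induction l generalizing cm with
  | nil => rfl
  | cons x xs ih => simpa [List.foldl_cons] using ih (cm.set x.toNat v)

theorem aWrite_length (id : Int) (cm : List Int) (idx L : Int) :
    (aWrite id cm idx L).length = cm.length := by
  simpa [aWrite] using foldl_set_length _ _ _

theorem aWrite_getElem? (id : Int) (cm : List Int) (a L : Nat)
    (j : Nat) (hj' : j < cm.length) :
    (aWrite id cm (a : Int) (L : Int))[j]? =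
      some (if a ≤ j ∧ j < a + L then id + 1 else cm[j]'hj') := by
  induction L with
  | zero =>
    rw [show aWrite id cm (a : Int) ((0 : Nat) : Int) = cm by
      simp [aWrite]]
    rw [if_neg (by omega), List.getElem?_eq_getElem hj']
  | succ L ih =>
    have hset : aWrite id cm (a : Int) ((L + 1 : Nat) : Int) =
        (aWrite id cm (a : Int) (L : Int)).set ((a : Int) + (L : Int)).toNat (id + 1) := by
      rw [show aWrite id cm (a : Int) ((L + 1 : Nat) : Int)
            = (PySem.List.pyRange (a : Int) (((a : Int) + (L : Int)) + 1)).foldl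
                (fun cm i => cm.set i.toNat (id + 1)) cm by
          simp only [aWrite]; norm_cast]
      rw [PySem.List.pyRange_one_succ_right (by omega), List.foldl_append]
      rfl
    have htn : ((a : Int) + (L : Int)).toNat = a + L := by omega
    rw [hset, List.getElem?_set, htn, aWrite_length]
    by_cases h : a + L = j
    · rw [if_pos h, if_pos (h ▸ hj'), if_pos (by omega)]
    · rw [if_neg h, ih]
      by_cases h2 : a ≤ j ∧ j < a + L
      · rw [if_pos h2, if_pos (by omega)]
      · rw [if_neg h2, if_neg (by omega)]

theorem aLoop_nil (t : List Char) (id : Int) (fuel : Nat) (idx : Int) (cm : List Int) :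
    aLoop t [] id fuel idx cm = cm := by
  induction fuel generalizing idx cm with
  | zero => rfl
  | succ fuel ih =>
    simp only [aLoop, List.length_nil, Nat.cast_zero]
    split
    · rw [show aWrite id cm idx 0 = cm by simp [aWrite], ih]
    · rfl

theorem aLoop_length (t e : List Char) (id : Int) (fuel : Nat) (idx : Int) (cm : List Int) :
    (aLoop t e id fuel idx cm).length = cm.length := by
  induction fuel generalizing idx cm with
  | zero => rfl
  | succ fuel ih =>
    simp only [aLoop]
    split
    · rw [ih, aWrite_length]
    · rfl

-- an occurrence at or after k is an infix of the k-suffix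
theorem prefix_drop_infix (t e : List Char) (k s : Nat) (hks : k ≤ s)
    (h : e <+: t.drop s) : e <:+: t.drop k := by
  have h2 : t.drop s = (t.drop k).drop (s - k) := by
    rw [List.drop_drop]; congr 1; omega
  exact h.isInfix.trans (h2 ▸ List.drop_suffix (s - k) (t.drop k)).isInfix

theorem prefix_drop_le_length (t e : List Char) (s : Nat) (he : e ≠ [])
    (h : e <+: t.drop s) : s + e.length ≤ t.length := by
  by_cases hs : s ≤ t.length
  · have := h.length_le
    rw [List.length_drop] at this
    omega
  · exfalso
    rw [List.drop_eq_nil_of_le (by omega)] at h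
    exact he (List.prefix_nil.mp h)

-- the while loop, entered with idx = the first occurrence of e in t at or after k
theorem aLoop_spec (t e : List Char) (he : e ≠ []) (id : Int) :
    ∀ (fuel : Nat) (k : Nat) (cm : List Int), k ≤ t.length → cm.length = t.length →
    t.length + 2 - k ≤ fuel →
    ∀ (j : Nat) (hj' : j < cm.length),
    (aLoop t e id fuel (PySem.Chars.findFrom t e (k : Int)) cm)[j]? =
      some (if ∃ s ≤ j, k ≤ s ∧ e <+: t.drop s ∧ j < s + e.length then id + 1
            else cm[j]'hj') := by
  intro fuel
  induction fuel with
  | zero => intro k cm hk hcm hfuel; omega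
  | succ f ih =>
    intro k cm hk hcm hfuel j hj'
    by_cases hr : PySem.Chars.findFrom t e (k : Int) = -1
    · have hno : ¬ ∃ s ≤ j, k ≤ s ∧ e <+: t.drop s ∧ j < s + e.length := by
        rintro ⟨s, _, hks, hpre, _⟩
        exact ((PySem.Chars.findFrom_natCast_eq_neg_one_iff t e k hk).mp hr)
          (prefix_drop_infix t e k s hks hpre)
      rw [hr, if_neg hno]
      show cm[j]? = _
      rw [List.getElem?_eq_getElem hj']
    · obtain ⟨hkr, hpre, hmin⟩ := PySem.Chars.findFrom_natCast_spec t e k hk hr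
      set r := PySem.Chars.findFrom t e (k : Int) with hrdef
      have hr0 : 0 ≤ r := le_trans (by omega) hkr
      have hra : r = ((r.toNat : Nat) : Int) := (Int.toNat_of_nonneg hr0).symm
      set a := r.toNat with hadef
      have hka : k ≤ a := by omega
      have hepos : 0 < e.length := List.length_pos_iff.mpr he
      have hfit : a + e.length ≤ t.length := prefix_drop_le_length t e a he hpre
      have hstep : aLoop t e id (f + 1) r cm =
          aLoop t e id f (PySem.Chars.findFrom t e ((a + 1 : Nat) : Int))
            (aWrite id cm ((a : Nat) : Int) ((e.length : Nat) : Int)) := by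
        simp only [aLoop]
        rw [if_pos hr0, hra, show ((a + 1 : Nat) : Int) = (a : Int) + 1 by push_cast; ring]
      have hcm' : (aWrite id cm ((a : Nat) : Int) ((e.length : Nat) : Int)).length = cm.length :=
        aWrite_length ..
      have hj'' : j < (aWrite id cm ((a : Nat) : Int) ((e.length : Nat) : Int)).length := by
        omega
      have hval : (aWrite id cm ((a : Nat) : Int) ((e.length : Nat) : Int))[j]'hj'' =
          if a ≤ j ∧ j < a + e.length then id + 1 else cm[j]'hj' := by
        have := aWrite_getElem? id cm a e.length j hj'
        rw [List.getElem?_eq_getElem hj''] at this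
        exact Option.some.inj this
      have hrec := ih (a + 1) (aWrite id cm ((a : Nat) : Int) ((e.length : Nat) : Int))
        (by omega) (by omega) (by omega) j (by omega)
      rw [hstep, hrec, hval]
      congr 1
      by_cases hC1 : ∃ s ≤ j, a + 1 ≤ s ∧ e <+: t.drop s ∧ j < s + e.length
      · obtain ⟨s, hsj, has, hp, hjs⟩ := hC1
        rw [if_pos ⟨s, hsj, has, hp, hjs⟩, if_pos ⟨s, hsj, by omega, hp, hjs⟩]
      · rw [if_neg hC1]
        by_cases hc : a ≤ j ∧ j < a + e.length
        · rw [if_pos hc, if_pos ⟨a, hc.1, hka, hpre, hc.2⟩]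
        · rw [if_neg hc, if_neg ?_]
          rintro ⟨s, hsj, hks, hp, hjs⟩
          have hsa : ¬ s < a := fun hlt => hmin s hks (by omega) hp
          by_cases hseq : s = a
          · exact hc ⟨hseq ▸ hsj, hseq ▸ hjs⟩
          · exact hC1 ⟨s, hsj, by omega, hp, hjs⟩

-- B's window test holds at j exactly when some occurrence of e covers position j
theorem window_iff (t e : List Char) (he : e ≠ []) (j : Nat) :
    (PySem.Chars.isIn e
      (PySem.List.slice t (some (max 0 ((j : Int) - (e.length : Int) + 1)))
        (some ((j : Int) + (e.length : Int)))) = true) ↔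
      ∃ s ≤ j, e <+: t.drop s ∧ j < s + e.length := by
  have hepos : 0 < e.length := List.length_pos_iff.mpr he
  have hslice : PySem.List.slice t (some (max 0 ((j : Int) - (e.length : Int) + 1)))
        (some ((j : Int) + (e.length : Int))) =
      (t.drop (max 0 ((j : Int) - (e.length : Int) + 1)).toNat).take
        (((j : Int) + (e.length : Int)).toNat
          - (max 0 ((j : Int) - (e.length : Int) + 1)).toNat) :=
    PySem.List.slice_toNat t (le_max_left 0 _) (by positivity)
  set lo := (max 0 ((j : Int) - (e.length : Int) + 1)).toNat with hlodef
  have hlo : lo = j + 1 - e.length := by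
    rcases le_total ((j : Int) - (e.length : Int) + 1) 0 with h | h
    · rw [hlodef, max_eq_left h]; omega
    · rw [hlodef, max_eq_right h]; omega
  have hhi : ((j : Int) + (e.length : Int)).toNat = j + e.length := by omega
  rw [hslice, hhi, ← PySem.Chars.exists_prefix_drop_iff_isIn]
  have hw : ∀ d : Nat, ((t.drop lo).take (j + e.length - lo)).drop d =
      (t.drop (lo + d)).take (j + e.length - lo - d) := by
    intro d; rw [List.drop_take, List.drop_drop]
  constructor
  · rintro ⟨d, hd⟩
    rw [hw d, List.prefix_take_iff] at hd
    exact ⟨lo + d, by omega, hd.1, by omega⟩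
  · rintro ⟨s, hsj, hp, hjs⟩
    refine ⟨s - lo, ?_⟩
    rw [hw (s - lo), List.prefix_take_iff,
      show lo + (s - lo) = s by omega]
    exact ⟨hp, by omega⟩

theorem fold_cm_length (text : String) (es : List String) (k0 : Int) (cm : List Int) :
    ((PySem.List.enumerate es k0).foldl
      (fun cm p => aLoop text.toList p.2.toList p.1 (text.toList.length + 2)
        (PySem.Str.findFrom text p.2 0) cm) cm).length = cm.length := by
  induction es generalizing k0 cm with
  | nil => rfl
  | cons e es ih =>
    simp only [PySem.List.enumerate, List.foldl_cons]
    rw [ih, aLoop_length]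

-- one entity of A's outer loop acts pointwise as B's per-position test
theorem entity_step (text : String) (e : String) (k0 : Int) (cm : List Int)
    (hcm : cm.length = text.toList.length) (j : Nat) (hj : j < cm.length) :
    (aLoop text.toList e.toList k0 (text.toList.length + 2)
        (PySem.Str.findFrom text e 0) cm)[j]? =
      some (if (PySem.Str.len e ≠ 0 ∧ PySem.Chars.isIn e.toList
          (PySem.List.slice text.toList (some (max 0 ((j : Int) - PySem.Str.len e + 1)))
            (some ((j : Int) + PySem.Str.len e))) = true)
        then k0 + 1 else cm[j]'hj) := by
  by_cases he : e.toList = []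
  · rw [he, aLoop_nil, if_neg, List.getElem?_eq_getElem hj]
    rintro ⟨hlen, -⟩
    exact hlen (by rw [PySem.Str.len_eq, he]; rfl)
  · have h0 : PySem.Str.findFrom text e 0 =
        PySem.Chars.findFrom text.toList e.toList (((0 : Nat) : Int)) := by
      rw [PySem.Str.findFrom_eq]; norm_num
    rw [h0, aLoop_spec text.toList e.toList he k0 (text.toList.length + 2) 0 cm
      (by omega) hcm (by omega) j hj]
    congr 1
    have hcond : (∃ s ≤ j, 0 ≤ s ∧ e.toList <+: text.toList.drop s ∧
          j < s + e.toList.length) ↔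
        (∃ s ≤ j, e.toList <+: text.toList.drop s ∧ j < s + e.toList.length) := by
      constructor
      · rintro ⟨s, h1, -, h2, h3⟩; exact ⟨s, h1, h2, h3⟩
      · rintro ⟨s, h1, h2, h3⟩; exact ⟨s, h1, Nat.zero_le s, h2, h3⟩
    have hlen : PySem.Str.len e = ((e.toList.length : Nat) : Int) := PySem.Str.len_eq e
    have hne : ((e.toList.length : Nat) : Int) ≠ 0 := by
      simpa using fun h => he (List.eq_nil_of_length_eq_zero h)
    have hiff := hcond.trans (window_iff text.toList e.toList he j).symm
    simp only [hlen]
    by_cases h : ∃ s ≤ j, 0 ≤ s ∧ e.toList <+: text.toList.drop s ∧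
        j < s + e.toList.length
    · rw [if_pos h, if_pos ⟨hne, hiff.mp h⟩]
    · rw [if_neg h, if_neg (fun hc => h (hiff.mpr hc.2))]

-- A's entity fold, read at one position, is B's per-position fold
theorem fold_cm (text : String) (es : List String) :
    ∀ (k0 : Int) (cm : List Int), cm.length = text.toList.length →
    ∀ (j : Nat) (hj : j < cm.length),
    ((PySem.List.enumerate es k0).foldl
      (fun cm p => aLoop text.toList p.2.toList p.1 (text.toList.length + 2)
        (PySem.Str.findFrom text p.2 0) cm) cm)[j]? =
    some ((PySem.List.enumerate es k0).foldl
      (fun best p =>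
        let L : Int := PySem.Str.len p.2
        if L ≠ 0 ∧ PySem.Chars.isIn p.2.toList
            (PySem.List.slice text.toList (some (max 0 ((j : Int) - L + 1)))
              (some ((j : Int) + L))) = true
        then p.1 + 1 else best) (cm[j]'hj)) := by
  induction es with
  | nil =>
    intro k0 cm hcm j hj
    simp [PySem.List.enumerate, List.getElem?_eq_getElem hj]
  | cons e es ih =>
    intro k0 cm hcm j hj
    simp only [PySem.List.enumerate, List.foldl_cons]
    have hcm' : (aLoop text.toList e.toList k0 (text.toList.length + 2)
        (PySem.Str.findFrom text e 0) cm).length = cm.length := aLoop_length ..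
    have hj' : j < (aLoop text.toList e.toList k0 (text.toList.length + 2)
        (PySem.Str.findFrom text e 0) cm).length := by omega
    rw [ih (k0 + 1) _ (by omega) j hj']
    congr 1
    have := entity_step text e k0 cm hcm j hj
    rw [List.getElem?_eq_getElem hj'] at this
    rw [Option.some.inj this]

theorem create_mask_spec' (text : String) (entityArr : List String) :
    create_mask text entityArr = create_mask_alt text entityArr := by
  simp only [create_mask, create_mask_alt]
  refine Eq.trans (PySem.List.foldl_prod_mk
    (fun cm (p : Int × String) => aLoop text.toList p.2.toList p.1 (text.toList.length + 2)
      (PySem.Str.findFrom text p.2 0) cm)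
    (fun em (p : Int × String) => em ++ PySem.List.pyRepeat [p.1 + 1] (PySem.Str.len p.2))
    (PySem.List.enumerate entityArr 0) (List.replicate text.toList.length 0) []) ?_
  refine Prod.ext ?_ ?_
  · -- content_mask
    show ((PySem.List.enumerate entityArr 0).foldl _ (List.replicate text.toList.length 0)) = _
    rw [PySem.Str.len_eq, show ((text.toList.length : Nat) : Int) = (text.toList.length : Int) from rfl,
      PySem.List.pyRange_zero_natCast, List.map_map]
    apply List.ext_getElem?
    intro j
    by_cases hjn : j < text.toList.length
    · rw [fold_cm text entityArr 0 (List.replicate text.toList.length 0)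
        (by simp) j (by simpa using hjn)]
      rw [List.getElem?_map, List.getElem?_range hjn]
      simp only [Option.map_some, Function.comp_apply]
      congr 1
      show _ = bLabel text.toList entityArr ((j : Nat) : Int)
      rw [bLabel]
      congr 1
      simp
    · rw [List.getElem?_eq_none, List.getElem?_eq_none]
      · simpa using hjn
      · rw [fold_cm_length]; simpa using hjn
  · -- entity_mask
    show ((PySem.List.enumerate entityArr 0).foldl _ ([] : List Int)) = _
    rw [PySem.List.foldl_append_eq_flatMap, List.nil_append]
    congr 1
    funext p
    rw [PySem.Str.len_eq, PySem.List.pyRepeat_singleton, Int.toNat_natCast]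
    exact (List.map_const' (l := p.2.toList) (b := p.1 + 1)).symm

-- ===== VERDICT (by name: the statement is the Claim_ definition above) =====
theorem create_mask_spec : Claim_equal_create_mask := by
  intro text entityArr _
  exact create_mask_spec' text entityArr
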